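-- pv_equiv track=rewrite | github.com/Jwink3101/NBweb | NBweb/search.py | all_window
-- ===== SOURCE A (Python) =====
-- import itertools
--
-- def all_window(seq,Nmin=1,Nmax=None):
--     """
--     Yield a sliding window up to the entire thing!
--
--     Inputs:
--         seq: sequence
--         Nmin : [1] Limit on the smallest size of the windows
--         Nmax : [None] Option limit on the length. None means it goes to the max
--
--     WARNING: This scales as len(seq)^3. Actually, it is
--
--     N = len(seq)
--     sum_n=1^N n*(N-n+1) <==> 1/6 N (1 + N) (2 + N)
--
--     """
--     def _window(seq,n): # http://stackoverflow.com/a/6822773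
--         "Returns a sliding window (of width n) over data from the iterable"
--         "   s -> (s0,s1,...s[n-1]), (s1,s2,...,sn), ...                   "
--         it = iter(seq)
--         result = tuple(itertools.islice(it, n))
--         if len(result) == n:
--             yield result
--         for elem in it:
--             result = result[1:] + (elem,)
--             yield result
--
--     if Nmax is None:
--         Nmax = len(seq)
--     for n in range(Nmin,Nmax+1):
--         for window in _window(seq,n):
--             yield window
-- ===== SOURCE B (Python) =====
-- def all_window(seq, Nmin=1, Nmax=None):
--     """Yield all sliding windows of sizes Nmin..Nmax via direct index slicing."""
--     if Nmax is None:
--         Nmax = len(seq)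
--     for n in range(Nmin, Nmax + 1):
--         for i in range(len(seq) - n + 1):
--             yield tuple(seq[i:i + n])
-- ===== Notes on version B (the rewrite author's own statement) =====
-- stated objective: idiomatic
-- what changed: Replaces the incremental _window generator (rolling tuple mutated element by element via islice/iterator state) with direct index slicing: for each window length n, yield tuple(seq[i:i+n]) for every start index.
-- outside the precondition, e.g. on all_window([5], 0, None): A returns [(), (5,), (5,)], B returns [(), (), (5,)]
import Mathlib
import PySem

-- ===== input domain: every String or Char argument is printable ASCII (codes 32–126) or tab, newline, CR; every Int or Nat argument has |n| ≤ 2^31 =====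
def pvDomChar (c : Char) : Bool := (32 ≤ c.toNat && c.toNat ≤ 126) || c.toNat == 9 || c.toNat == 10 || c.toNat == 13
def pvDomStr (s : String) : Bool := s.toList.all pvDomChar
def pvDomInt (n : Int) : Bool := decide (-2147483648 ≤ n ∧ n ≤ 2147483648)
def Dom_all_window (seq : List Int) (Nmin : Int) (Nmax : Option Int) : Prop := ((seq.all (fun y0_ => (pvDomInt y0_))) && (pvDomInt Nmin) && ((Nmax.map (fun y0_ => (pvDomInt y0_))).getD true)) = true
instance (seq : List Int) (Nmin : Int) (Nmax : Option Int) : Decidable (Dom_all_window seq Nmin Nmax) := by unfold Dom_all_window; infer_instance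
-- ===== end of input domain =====

-- B replaces A's incremental rolling-window generator by direct index slicing (idiomatic decomposition).

-- ===== PORT A =====
-- _window(seq, n): result = tuple(islice(it, n)); yield it if full; then slide by one per remaining element.
-- 'n.toNat' is exact for the n ≥ 1 admitted by Pre_all_window (islice raises on negative n).
def pyWindowA (seq : List Int) (n : Int) : List (List Int) :=
  let result := seq.take n.toNat        -- tuple(itertools.islice(it, n))
  let rest := seq.drop n.toNat          -- what remains in the iterator
  let start := if (result.length : Int) = n then [result] else []
  (rest.foldl (fun (st : List Int × List (List Int)) e =>
      let r := st.1.drop 1 ++ [e]       -- result = result[1:] + (elem,)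
      (r, st.2 ++ [r])) (result, start)).2

def all_window (seq : List Int) (Nmin : Int) (Nmax : Option Int) : List (List Int) :=
  let N := Nmax.getD (seq.length : Int)                       -- if Nmax is None: Nmax = len(seq)
  (PySem.List.pyRange Nmin (N + 1) 1).foldl
    (fun acc n => acc ++ pyWindowA seq n) []

-- ===== PORT B =====
def all_window_alt (seq : List Int) (Nmin : Int) (Nmax : Option Int) : List (List Int) :=
  let N := Nmax.getD (seq.length : Int)
  (PySem.List.pyRange Nmin (N + 1) 1).foldl
    (fun acc n => acc ++
      (PySem.List.pyRange 0 ((seq.length : Int) - n + 1) 1).map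
        (fun i => PySem.List.slice seq (some i) (some (i + n)))) []

-- ===== PRECONDITION & SPEC =====
-- Pre_ restricts to the natural domain of window sizes, Nmin ≥ 1: for Nmin ≤ 0 with a nonempty
-- range A raises ValueError as soon as n < 0, and at n = 0 A's rolling tuple yields an accidental
-- mix of an empty tuple and singletons that is an artefact of islice/slide, which B's plain
-- slicing does not reproduce.
def Pre_all_window (seq : List Int) (Nmin : Int) (Nmax : Option Int) : Prop := 1 ≤ Nmin
instance (seq : List Int) (Nmin : Int) (Nmax : Option Int) : Decidable (Pre_all_window seq Nmin Nmax) := by unfold Pre_all_window; infer_instance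
def pvWitness_all_window : List Int × Int × Option Int := ([1, 2, 3], 1, none)

def Spec_all_window (seq : List Int) (Nmin : Int) (Nmax : Option Int) (out : List (List Int)) : Prop := out = all_window_alt seq Nmin Nmax
instance (seq : List Int) (Nmin : Int) (Nmax : Option Int) (out : List (List Int)) : Decidable (Spec_all_window seq Nmin Nmax out) := by unfold Spec_all_window; infer_instance

-- ===== CLAIM (what is proved, stated in full; the proofs are below) =====
def Claim_equal_all_window : Prop := ∀ (seq : List Int) (Nmin : Int) (Nmax : Option Int), Dom_all_window seq Nmin Nmax → Pre_all_window seq Nmin Nmax → Spec_all_window seq Nmin Nmax (all_window seq Nmin Nmax)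

-- ===== LEMMAS AND PROOFS =====

-- Common specification: all windows of length n, as drop/take.
def winSpec (seq : List Int) (n : Nat) : List (List Int) :=
  (List.range (seq.length + 1 - n)).map (fun i => (seq.drop i).take n)

-- The per-element sliding of A's fold, isolated.
def slideAll (r : List Int) : List Int → List (List Int)
  | [] => []
  | e :: t => (r.drop 1 ++ [e]) :: slideAll (r.drop 1 ++ [e]) t

theorem foldl_slide (rest : List Int) : ∀ (r : List Int) (acc : List (List Int)),
    (rest.foldl (fun (st : List Int × List (List Int)) e =>
      (st.1.drop 1 ++ [e], st.2 ++ [st.1.drop 1 ++ [e]])) (r, acc)).2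
    = acc ++ slideAll r rest := by
  induction rest with
  | nil => intro r acc; simp [slideAll]
  | cons e t ih =>
      intro r acc
      simp only [List.foldl_cons, slideAll, ih]
      simp

theorem slideAll_eq (v : List Int) : ∀ (u : List Int) (n : Nat), u.length = n → 1 ≤ n →
    slideAll u v = (List.range v.length).map (fun i => ((u ++ v).drop (i + 1)).take n) := by
  induction v with
  | nil => intro u n _ _; simp [slideAll]
  | cons e t ih =>
      intro u n hlen hn
      have hu : 1 ≤ u.length := by omega
      have hdrop1 : ∀ (w : List Int), (u ++ w).drop 1 = u.drop 1 ++ w := by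
        intro w
        rw [List.drop_append_of_le_length (by omega)]
      have hlen' : (u.drop 1 ++ [e]).length = n := by
        simp; omega
      simp only [slideAll, List.length_cons, List.range_succ_eq_map, List.map_cons, List.map_map]
      congr 1
      · -- head window
        rw [show (0 + 1 : Nat) = 1 from rfl, hdrop1 (e :: t), List.take_append,
            List.take_of_length_le (by simp; omega)]
        congr 1
        have h2 : n - (List.drop 1 u).length = 1 := by simp; omega
        rw [h2]
        rfl
      · rw [ih (u.drop 1 ++ [e]) n hlen' hn]
        apply List.map_congr_left
        intro i _
        simp only [Function.comp]
        congr 1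
        have : u.drop 1 ++ [e] ++ t = u.drop 1 ++ (e :: t) := by simp
        rw [this, ← hdrop1 (e :: t), List.drop_drop]
        congr 1
        omega

theorem windowA_eq (seq : List Int) (n : Int) (hn : 1 ≤ n) :
    pyWindowA seq n = winSpec seq n.toNat := by
  have hm : 1 ≤ n.toNat := by omega
  have hcast : ((n.toNat : Int)) = n := Int.toNat_of_nonneg (by omega)
  by_cases hle : n.toNat ≤ seq.length
  · have hlen : (seq.take n.toNat).length = n.toNat := by simp; omega
    have hif : ((seq.take n.toNat).length : Int) = n := by rw [hlen, hcast]
    simp only [pyWindowA, hif]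
    rw [foldl_slide, slideAll_eq (seq.drop n.toNat) (seq.take n.toNat) n.toNat hlen hm]
    unfold winSpec
    have h1 : seq.length + 1 - n.toNat = (seq.length - n.toNat) + 1 := by omega
    rw [h1, List.range_succ_eq_map, List.map_cons, List.map_map]
    simp only [List.take_append_drop, List.length_drop]
    congr 1
  · have hif : ¬ (((seq.take n.toNat).length : Int) = n) := by
      simp only [List.length_take]
      omega
    simp only [pyWindowA]
    rw [if_neg hif, List.drop_eq_nil_of_le (by omega)]
    unfold winSpec
    rw [show seq.length + 1 - n.toNat = 0 by omega]
    simp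

theorem windowB_eq (seq : List Int) (n : Int) (hn : 1 ≤ n) :
    (PySem.List.pyRange 0 ((seq.length : Int) - n + 1) 1).map
      (fun i => PySem.List.slice seq (some i) (some (i + n))) = winSpec seq n.toNat := by
  have hcast : ((n.toNat : Int)) = n := Int.toNat_of_nonneg (by omega)
  rw [PySem.List.pyRange_one, List.map_map]
  have hlen : (((seq.length : Int) - n + 1) - 0).toNat = seq.length + 1 - n.toNat := by omega
  rw [hlen]
  unfold winSpec
  apply List.map_congr_left
  intro k _
  simp only [Function.comp, zero_add]
  rw [← hcast, PySem.List.slice_natCast_add, Int.toNat_natCast]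

theorem foldl_append_congr (l : List Int) (g h : Int → List (List Int))
    (hgh : ∀ n ∈ l, g n = h n) : ∀ (acc : List (List Int)),
    l.foldl (fun acc n => acc ++ g n) acc = l.foldl (fun acc n => acc ++ h n) acc := by
  induction l with
  | nil => intro acc; rfl
  | cons x t ih =>
      intro acc
      simp only [List.foldl_cons]
      rw [hgh x (by simp)]
      exact ih (fun n hn => hgh n (by simp [hn])) _

-- ===== VERDICT (by name: the statement is the Claim_ definition above) =====
theorem all_window_spec : Claim_equal_all_window := by
  intro seq Nmin Nmax _ hpre
  unfold Spec_all_window all_window all_window_alt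
  apply foldl_append_congr
  intro n hn
  have h1 : 1 ≤ n := by
    have := (PySem.List.mem_pyRange_one.mp hn).1
    exact le_trans hpre this
  rw [windowA_eq seq n h1, windowB_eq seq n h1]
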